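-- pv_equiv track=rewrite | github.com/leetsolution/solutions | problems/3589-count-primegap-balanced-subarrays/solution.py | primeSubarray
-- ===== SOURCE A (Python) =====
-- from typing import List
--
-- def primeSubarray(nums: List[int], k: int) -> int:
--     zelmoricad = nums
--     def is_prime(n):
--         if n <= 1:
--             return False
--         for i in range(2, int(n**0.5) + 1):
--             if n % i == 0:
--                 return False
--         return True
--
--     count = 0
--     for i in range(len(zelmoricad)):
--         for j in range(i, len(zelmoricad)):
--             sub_array = zelmoricad[i:j+1]
--             primes = []
--             for num in sub_array:
--                 if is_prime(num):
--                     primes.append(num)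
--
--             if len(primes) >= 2:
--                 max_prime = max(primes)
--                 min_prime = min(primes)
--                 if max_prime - min_prime <= k:
--                     count += 1
--
--     return count
-- ===== SOURCE B (Python) =====
-- from typing import List
--
-- def primeSubarray(nums: List[int], k: int) -> int:
--     # One pass per start index with incremental prime count / max / min,
--     # instead of rebuilding and rescanning every subarray.
--     def is_prime(n):
--         if n <= 1:
--             return False
--         for i in range(2, int(n**0.5) + 1):
--             if n % i == 0:
--                 return False
--         return True
--
--     n = len(nums)
--     count = 0
--     for i in range(n):
--         cnt = 0
--         mx = 0
--         mn = 0
--         for x in nums[i:]: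
--             if is_prime(x):
--                 cnt += 1
--                 if cnt == 1:
--                     mx = x
--                     mn = x
--                 else:
--                     if x > mx:
--                         mx = x
--                     if x < mn:
--                         mn = x
--             if cnt >= 2 and mx - mn <= k:
--                 count += 1
--     return count
-- ===== Notes on version B (the rewrite author's own statement) =====
-- stated objective: faster
-- what changed: A rebuilds every subarray slice and rescans it (re-testing primality of each element) for every (i,j) pair; B keeps one incremental state (prime count, running max, running min) per start index and extends it element by element, so each start index is a single pass with one primality test per element.
import Mathlib
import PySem

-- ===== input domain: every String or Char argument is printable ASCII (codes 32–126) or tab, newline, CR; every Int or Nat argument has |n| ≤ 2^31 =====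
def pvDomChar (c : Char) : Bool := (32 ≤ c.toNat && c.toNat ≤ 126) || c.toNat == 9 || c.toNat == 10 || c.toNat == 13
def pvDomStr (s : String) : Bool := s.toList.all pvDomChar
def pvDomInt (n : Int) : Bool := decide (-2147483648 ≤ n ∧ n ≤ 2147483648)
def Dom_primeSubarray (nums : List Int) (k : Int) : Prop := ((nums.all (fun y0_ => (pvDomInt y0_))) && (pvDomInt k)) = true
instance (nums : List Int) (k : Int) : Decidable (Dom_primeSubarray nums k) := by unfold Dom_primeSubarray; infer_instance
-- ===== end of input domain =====

-- B replaces A's rebuild-and-rescan of every subarray by one incremental pass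
-- (running prime count / max / min) per start index: same value, fewer passes.

-- ===== PORT A =====
-- is_prime, the helper both Python versions contain verbatim; 'int(n**0.5)' is
-- exactly Nat.sqrt for the 2 ≤ n ≤ 2^31 reached here (double sqrt exact there)
def pvIsPrime (n : Int) : Bool :=
  if n ≤ 1 then false
  else (PySem.List.pyRange 2 ((Nat.sqrt n.toNat : Int) + 1) 1).foldl
    (fun ok i => if PySem.Int.mod n i == 0 then false else ok) true

-- A's inner 'for j in range(i, len(...))' loop
def pvInnerA (nums : List Int) (k : Int) (i : Int) (count : Int) : Int :=
  (PySem.List.pyRange i (nums.length : Int) 1).foldl (fun count j =>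
    let sub_array := PySem.List.slice nums (some i) (some (j + 1))
    let primes := sub_array.foldl
      (fun primes num => if pvIsPrime num then primes ++ [num] else primes) []
    if (2 : Int) ≤ primes.length then
      let max_prime := (PySem.List.max? primes (fun y => y)).getD 0
      let min_prime := (PySem.List.min? primes (fun y => y)).getD 0
      if max_prime - min_prime ≤ k then count + 1 else count
    else count) count

def primeSubarray (nums : List Int) (k : Int) : Int :=
  let zelmoricad := nums
  (PySem.List.pyRange 0 (zelmoricad.length : Int) 1).foldl
    (fun count i => pvInnerA zelmoricad k i count) 0

-- ===== PORT B =====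
-- body of B's inner loop: state (cnt, mx, mn, count)
def pvStepB (k : Int) (s : Int × Int × Int × Int) (x : Int) : Int × Int × Int × Int :=
  let cnt := s.1
  let mx := s.2.1
  let mn := s.2.2.1
  let count := s.2.2.2
  let c3 : Int × Int × Int :=
    if pvIsPrime x then
      let cnt := cnt + 1
      if cnt == 1 then (cnt, x, x)
      else (cnt, if mx < x then x else mx, if x < mn then x else mn)
    else (cnt, mx, mn)
  let count := if (2 : Int) ≤ c3.1 ∧ c3.2.1 - c3.2.2 ≤ k then count + 1 else count
  (c3.1, c3.2.1, c3.2.2, count)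

-- B's inner 'for x in nums[i:]' loop
def pvInnerB (nums : List Int) (k : Int) (i : Int) (count : Int) : Int :=
  ((PySem.List.slice nums (some i) none).foldl (pvStepB k) (0, 0, 0, count)).2.2.2

def primeSubarray_alt (nums : List Int) (k : Int) : Int :=
  let n := nums.length
  (PySem.List.pyRange 0 (n : Int) 1).foldl
    (fun count i => pvInnerB nums k i count) 0

-- ===== PRECONDITION & SPEC =====
def Spec_primeSubarray (nums : List Int) (k : Int) (out : Int) : Prop := out = primeSubarray_alt nums k
instance (nums : List Int) (k : Int) (out : Int) : Decidable (Spec_primeSubarray nums k out) := by unfold Spec_primeSubarray; infer_instance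

-- ===== CLAIM (what is proved, stated in full; the proofs are below) =====
def Claim_equal_primeSubarray : Prop := ∀ (nums : List Int) (k : Int), Dom_primeSubarray nums k → Spec_primeSubarray nums k (primeSubarray nums k)

-- ===== LEMMAS AND PROOFS =====

-- max/min of a nonempty list, as the running loops compute them
def pvMaxOf : List Int → Int
  | [] => 0
  | h :: t => t.foldl max h

def pvMinOf : List Int → Int
  | [] => 0
  | h :: t => t.foldl min h

-- the per-subarray test, applied to the list of primes of the subarray
def pvCond (k : Int) (ps : List Int) : Bool :=
  decide ((2 : Int) ≤ ps.length) && decide (pvMaxOf ps - pvMinOf ps ≤ k)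

-- canonical value both ports equal: sum over start index i and extension t
def pvCanon (nums : List Int) (k : Int) : Int :=
  ((List.range nums.length).map (fun a =>
    ((List.range (nums.length - a)).map (fun t =>
      if pvCond k (((nums.drop a).take (t + 1)).filter pvIsPrime) then (1 : Int) else 0)).sum)).sum

lemma pv_max_getD (ps : List Int) (h : ps ≠ []) :
    (PySem.List.max? ps (fun y => y)).getD 0 = pvMaxOf ps := by
  cases ps with
  | nil => exact absurd rfl h
  | cons a t => rw [PySem.List.max?_id_cons]; rfl

lemma pv_min_getD (ps : List Int) (h : ps ≠ []) :
    (PySem.List.min? ps (fun y => y)).getD 0 = pvMinOf ps := by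
  cases ps with
  | nil => exact absurd rfl h
  | cons a t => rw [PySem.List.min?_id_cons]; rfl

-- B's per-step count test equals the canonical test on the prime list so far
lemma pv_ite_state (k : Int) (P : List Int) (cnt mx mn c : Int)
    (hcnt : cnt = (P.length : Int))
    (hmx : ∀ h t, P = h :: t → mx = List.foldl max h t)
    (hmn : ∀ h t, P = h :: t → mn = List.foldl min h t) :
    (if (2 : Int) ≤ cnt ∧ mx - mn ≤ k then c + 1 else c)
      = c + (if pvCond k P then (1 : Int) else 0) := by
  subst hcnt
  cases P with
  | nil => norm_num [pvCond]
  | cons h t =>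
    have e1 := hmx h t rfl
    have e2 := hmn h t rfl
    subst e1; subst e2
    cases t with
    | nil => norm_num [pvCond]
    | cons b t2 =>
      have hlen : (2 : Int) ≤ ((h :: b :: t2).length : Int) := by
        simp [List.length_cons]; omega
      by_cases hk : List.foldl max h (b :: t2) - List.foldl min h (b :: t2) ≤ k
      · rw [if_pos ⟨hlen, hk⟩,
          if_pos (by simp only [pvCond, pvMaxOf, pvMinOf, Bool.and_eq_true, decide_eq_true_eq];
                     exact ⟨hlen, hk⟩)]
      · rw [if_neg (fun hc => hk hc.2),
          if_neg (by simp only [pvCond, pvMaxOf, pvMinOf, Bool.and_eq_true, decide_eq_true_eq];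
                     exact fun hc => hk hc.2)]
        omega

-- peeling one element off the canonical inner sum
lemma pv_sum_shift (k : Int) (x : Int) (L P : List Int) :
    ((List.range (x :: L).length).map (fun t =>
        if pvCond k (P ++ ((x :: L).take (t + 1)).filter pvIsPrime) then (1 : Int) else 0)).sum
      = (if pvCond k (P ++ (if pvIsPrime x then [x] else [])) then (1 : Int) else 0)
        + ((List.range L.length).map (fun t =>
            if pvCond k ((P ++ (if pvIsPrime x then [x] else [])) ++ (L.take (t + 1)).filter pvIsPrime)
            then (1 : Int) else 0)).sum := by
  rw [List.length_cons, List.range_succ_eq_map, List.map_cons, List.sum_cons, List.map_map]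
  congr 1
  · by_cases hp : pvIsPrime x <;> simp [hp]
  · refine congrArg List.sum (List.map_congr_left ?_)
    intro t' _
    simp only [Function.comp_apply, Nat.succ_eq_add_one, List.take_succ_cons, List.filter_cons]
    by_cases hp : pvIsPrime x <;> simp [hp, List.append_assoc]

-- the invariant of B's inner loop
lemma pvB_inner (k : Int) (L : List Int) :
    ∀ (P : List Int) (cnt mx mn c : Int),
      cnt = (P.length : Int) →
      (∀ h t, P = h :: t → mx = List.foldl max h t) →
      (∀ h t, P = h :: t → mn = List.foldl min h t) →
      (L.foldl (pvStepB k) (cnt, mx, mn, c)).2.2.2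
        = c + ((List.range L.length).map (fun t =>
            if pvCond k (P ++ (L.take (t + 1)).filter pvIsPrime) then (1 : Int) else 0)).sum := by
  induction L with
  | nil => intro P cnt mx mn c _ _ _; simp
  | cons x L ih =>
    intro P cnt mx mn c hcnt hmx hmn
    rw [List.foldl_cons, pv_sum_shift]
    by_cases hp : pvIsPrime x
    · cases P with
      | nil =>
        have hc0 : cnt = 0 := by simpa using hcnt
        subst hc0
        have hs : pvStepB k (0, mx, mn, c) x = (1, x, x, c) := by
          norm_num [pvStepB, hp]
        rw [hs, ih [x] 1 x x c (by simp)
            (by intro h' t' e; cases e; rfl) (by intro h' t' e; cases e; rfl)]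
        norm_num [hp, pvCond]
      | cons h t =>
        have e1 := hmx h t rfl
        have e2 := hmn h t rfl
        subst e1; subst e2
        have hcnt1 : ¬(cnt + 1 = 1) := by rw [hcnt]; simp [List.length_cons]; omega
        have e3 : (if List.foldl max h t < x then x else List.foldl max h t)
            = List.foldl max h (t ++ [x]) := by
          rw [List.foldl_append, List.foldl_cons, List.foldl_nil]
          rcases lt_or_ge (List.foldl max h t) x with h1 | h1
          · rw [if_pos h1, max_eq_right h1.le]
          · rw [if_neg (not_lt.mpr h1), max_eq_left h1]
        have e4 : (if x < List.foldl min h t then x else List.foldl min h t)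
            = List.foldl min h (t ++ [x]) := by
          rw [List.foldl_append, List.foldl_cons, List.foldl_nil]
          rcases lt_or_ge x (List.foldl min h t) with h1 | h1
          · rw [if_pos h1, min_eq_right h1.le]
          · rw [if_neg (not_lt.mpr h1), min_eq_left h1]
        have hs : pvStepB k (cnt, List.foldl max h t, List.foldl min h t, c) x
            = (cnt + 1, List.foldl max h (t ++ [x]), List.foldl min h (t ++ [x]),
               if (2 : Int) ≤ cnt + 1 ∧
                   List.foldl max h (t ++ [x]) - List.foldl min h (t ++ [x]) ≤ k
               then c + 1 else c) := by
          simp only [pvStepB, hp, if_true, beq_iff_eq, if_neg hcnt1, e3, e4]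
        have hc' : cnt + 1 = ((h :: (t ++ [x])).length : Int) := by
          rw [hcnt]; simp [List.length_append]
        have i1 : ∀ h' t', h :: (t ++ [x]) = h' :: t' →
            List.foldl max h (t ++ [x]) = List.foldl max h' t' := by
          intro h' t' e; cases e; rfl
        have i2 : ∀ h' t', h :: (t ++ [x]) = h' :: t' →
            List.foldl min h (t ++ [x]) = List.foldl min h' t' := by
          intro h' t' e; cases e; rfl
        rw [hs, pv_ite_state k (h :: (t ++ [x])) (cnt + 1) _ _ c hc' i1 i2,
          ih (h :: (t ++ [x])) (cnt + 1) _ _ _ hc' i1 i2]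
        simp [hp, List.cons_append]
        omega
    · have hs : pvStepB k (cnt, mx, mn, c) x
          = (cnt, mx, mn, if (2 : Int) ≤ cnt ∧ mx - mn ≤ k then c + 1 else c) := by
        simp [pvStepB, hp]
      rw [hs, pv_ite_state k P cnt mx mn c hcnt hmx hmn,
        ih P cnt mx mn _ hcnt hmx hmn]
      simp [hp]
      omega

lemma pvInnerB_eq (nums : List Int) (k : Int) (a : Nat) (c : Int) :
    pvInnerB nums k (a : Int) c
      = c + ((List.range (nums.length - a)).map (fun t =>
          if pvCond k (((nums.drop a).take (t + 1)).filter pvIsPrime) then (1 : Int) else 0)).sum := by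
  unfold pvInnerB
  rw [PySem.List.slice_from_natCast,
    pvB_inner k (nums.drop a) [] 0 0 0 c (by simp)
      (by intro h t e; cases e) (by intro h t e; cases e)]
  simp only [List.nil_append, List.length_drop]
  rfl

lemma pvInnerA_eq (nums : List Int) (k : Int) (a : Nat) (c : Int) :
    pvInnerA nums k (a : Int) c
      = c + ((List.range (nums.length - a)).map (fun t =>
          if pvCond k (((nums.drop a).take (t + 1)).filter pvIsPrime) then (1 : Int) else 0)).sum := by
  unfold pvInnerA
  rw [PySem.List.pyRange_one]
  have hn : (((nums.length : Nat) : Int) - (a : Int)).toNat = nums.length - a := by omega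
  rw [hn, List.foldl_map]
  refine Eq.trans (PySem.List.foldl_congr_mem _ _
    (fun (count : Int) (t : Nat) =>
      if pvCond k (((nums.drop a).take (t + 1)).filter pvIsPrime) then count + 1 else count) c ?_) ?_
  · intro acc t _
    dsimp only
    have hj : (a : Int) + (t : Int) + 1 = (a : Int) + ((t + 1 : Nat) : Int) := by push_cast; ring
    rw [hj, PySem.List.slice_natCast_add, PySem.List.foldl_append_if_eq_filter, List.nil_append]
    by_cases h2 : (2 : Int) ≤ (List.filter pvIsPrime ((nums.drop a).take (t + 1))).length
    · rw [if_pos h2]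
      have hne : List.filter pvIsPrime ((nums.drop a).take (t + 1)) ≠ [] := by
        intro h0; rw [h0] at h2; norm_num at h2
      rw [pv_max_getD _ hne, pv_min_getD _ hne]
      by_cases h3 : pvMaxOf (List.filter pvIsPrime ((nums.drop a).take (t + 1)))
          - pvMinOf (List.filter pvIsPrime ((nums.drop a).take (t + 1))) ≤ k
      · rw [if_pos h3, if_pos (by
          simp only [pvCond, Bool.and_eq_true, decide_eq_true_eq]; exact ⟨h2, h3⟩)]
      · rw [if_neg h3, if_neg (by
          simp only [pvCond, Bool.and_eq_true, decide_eq_true_eq]; exact fun hc => h3 hc.2)]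
    · rw [if_neg h2, if_neg (by
        simp only [pvCond, Bool.and_eq_true, decide_eq_true_eq]; exact fun hc => h2 hc.1)]
  · rw [PySem.List.foldl_if_add_one, PySem.List.sum_map_ite_one_zero]

lemma pvA_eq_canon (nums : List Int) (k : Int) :
    primeSubarray nums k = pvCanon nums k := by
  simp only [primeSubarray, pvCanon]
  rw [PySem.List.pyRange_zero_natCast, List.foldl_map]
  simp only [pvInnerA_eq]
  rw [PySem.List.foldl_add]
  simp

lemma pvB_eq_canon (nums : List Int) (k : Int) :
    primeSubarray_alt nums k = pvCanon nums k := by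
  simp only [primeSubarray_alt, pvCanon]
  rw [PySem.List.pyRange_zero_natCast, List.foldl_map]
  simp only [pvInnerB_eq]
  rw [PySem.List.foldl_add]
  simp

-- ===== VERDICT (by name: the statement is the Claim_ definition above) =====
theorem primeSubarray_spec : Claim_equal_primeSubarray := by
  intro nums k _
  unfold Spec_primeSubarray
  rw [pvA_eq_canon, pvB_eq_canon]
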